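-- pv_equiv track=rewrite | github.com/Anwesha-mishra-9090/Aura_4.0 | AURA/brain/date_parser.py | parse_priority
-- ===== SOURCE A (Python) =====
-- def parse_priority(command):
--     """
--     Extract priority from natural language
--     Returns: 3 (high), 2 (medium), 1 (low)
--     """
--     command = command.lower()
--
--     if any(word in command for word in ['high', 'important', 'urgent', 'critical', 'asap']):
--         return 3
--     elif any(word in command for word in ['medium', 'normal']):
--         return 2
--     elif any(word in command for word in ['low', 'not important', 'whenever']):
--         return 1
--     else:
--         return 2
-- ===== SOURCE B (Python) =====
-- def parse_priority(command):
--     """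
--     Extract priority from natural language
--     Returns: 3 (high), 2 (medium), 1 (low)
--     """
--     c = command.lower()
--     groups = [(['high', 'important', 'urgent', 'critical', 'asap'], 3),
--               (['medium', 'normal'], 2),
--               (['low', 'not important', 'whenever'], 1)]
--     levels = [lvl for phrases, lvl in groups if any(p in c for p in phrases)]
--     return max(levels) if levels else 2
-- ===== Notes on version B (the rewrite author's own statement) =====
-- stated objective: alternative
-- what changed: Replaces the ordered if/elif short-circuit chain with a declarative (phrases, level) table: gather every matching level in one pass and return the maximum, defaulting to 2.
import Mathlib
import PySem

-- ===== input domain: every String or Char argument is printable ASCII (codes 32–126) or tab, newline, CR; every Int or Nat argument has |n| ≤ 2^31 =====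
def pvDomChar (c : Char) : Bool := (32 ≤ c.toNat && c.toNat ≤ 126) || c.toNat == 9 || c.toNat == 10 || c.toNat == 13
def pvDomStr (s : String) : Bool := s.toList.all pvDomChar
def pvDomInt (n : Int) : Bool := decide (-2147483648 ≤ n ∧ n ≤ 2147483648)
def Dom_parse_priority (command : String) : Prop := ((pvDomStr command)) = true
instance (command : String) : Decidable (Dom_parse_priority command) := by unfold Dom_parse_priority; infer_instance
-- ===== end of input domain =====

-- B replaces the if/elif chain with a (phrases, level) table gathered then maxed; equal results.
-- ===== PORT A =====
def parse_priority (command : String) : Int :=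
  let command := PySem.Str.lower command
  if (["high", "important", "urgent", "critical", "asap"].any fun word => PySem.Str.isIn word command) then 3
  else if (["medium", "normal"].any fun word => PySem.Str.isIn word command) then 2
  else if (["low", "not important", "whenever"].any fun word => PySem.Str.isIn word command) then 1
  else 2

-- ===== PORT B =====
def parse_priority_alt (command : String) : Int :=
  let c := PySem.Str.lower command
  let groups : List (List String × Int) :=
    [(["high", "important", "urgent", "critical", "asap"], 3),
     (["medium", "normal"], 2),
     (["low", "not important", "whenever"], 1)]
  let levels := (groups.filter fun g => g.1.any fun p => PySem.Str.isIn p c).map (·.2)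
  match PySem.List.max? levels (fun x => x) with
  | some m => m
  | none => 2

-- ===== PRECONDITION & SPEC =====
def Spec_parse_priority (command : String) (out : Int) : Prop := out = parse_priority_alt command
instance (command : String) (out : Int) : Decidable (Spec_parse_priority command out) := by unfold Spec_parse_priority; infer_instance

-- ===== CLAIM (what is proved, stated in full; the proofs are below) =====
def Claim_equal_parse_priority : Prop := ∀ (command : String), Dom_parse_priority command → Spec_parse_priority command (parse_priority command)

-- ===== LEMMAS AND PROOFS =====

-- ===== VERDICT (by name: the statement is the Claim_ definition above) =====
theorem parse_priority_spec : Claim_equal_parse_priority := by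
  intro command _
  unfold Spec_parse_priority parse_priority parse_priority_alt
  cases h1 : (["high", "important", "urgent", "critical", "asap"].any fun word => PySem.Str.isIn word (PySem.Str.lower command)) <;>
  cases h2 : (["medium", "normal"].any fun word => PySem.Str.isIn word (PySem.Str.lower command)) <;>
  cases h3 : (["low", "not important", "whenever"].any fun word => PySem.Str.isIn word (PySem.Str.lower command)) <;>
    simp_all [List.any, PySem.List.max?]
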